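-- pv_equiv track=rewrite | github.com/pavesiriccardo/MF3D | MF3D_class.py | remove_cont_sources
-- ===== SOURCE A (Python) =====
-- def remove_cont_sources(cont_source,reduint):
-- 	"""
--
-- 	This function allows removing line candidates which are too close to a continuum source and are therefore likely to be noise on top of continuum emission
--
-- 	Parameters
-- 	----------
-- 	cont_source: list of triplets of int
-- 		list of continuum source coordinates in (xpix,ypix,chan) form
-- 	reduint: dictionary of lists
-- 		list of all line candidates in standard format defined above
--
-- 	Returns
-- 	-------
-- 	reduint_no_cont: dictionary of lists
-- 		list of all line candidates in standard format, with sources removed if lying spatially too close to continuum source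
--
-- 	"""
-- 	reduint_no_cont=[]
-- 	for obj in reduint:
-- 		cont=False
-- 		for co_id in cont_source:
-- 			if (obj[1][0]-co_id[0])**2+(obj[1][1]-co_id[1])**2<25:
-- 				cont=True
-- 		if not cont:
-- 			reduint_no_cont.append(obj)
-- 	return reduint_no_cont
-- ===== SOURCE B (Python) =====
-- def remove_cont_sources(cont_source, reduint):
--     # Spatial hash: bucket continuum sources by 5x5 cell; each object only
--     # checks the 9 neighboring cells (distance^2 < 25 implies |dx|,|dy| <= 4,
--     # so any close source lies in an adjacent cell).
--     grid = {}
--     for co in cont_source: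
--         key = (co[0] // 5, co[1] // 5)
--         grid.setdefault(key, []).append((co[0], co[1]))
--     out = []
--     for obj in reduint:
--         x, y = obj[1][0], obj[1][1]
--         kx, ky = x // 5, y // 5
--         close = any((x - cx) ** 2 + (y - cy) ** 2 < 25
--                     for dx in (-1, 0, 1) for dy in (-1, 0, 1)
--                     for (cx, cy) in grid.get((kx + dx, ky + dy), []))
--         if not close:
--             out.append(obj)
--     return out
-- ===== Notes on version B (the rewrite author's own statement) =====
-- stated objective: faster
-- what changed: Replaced the nested scan of all continuum sources per candidate with a spatial hash that buckets sources into 5x5 cells, so each candidate only inspects the 9 neighboring cells.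
-- outside the precondition, e.g. on remove_cont_sources([[1]], []): A returns [], B raises IndexError; on remove_cont_sources([], [[[1], [2]]]): A returns [[[1], [2]]], B raises IndexError
import Mathlib
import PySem

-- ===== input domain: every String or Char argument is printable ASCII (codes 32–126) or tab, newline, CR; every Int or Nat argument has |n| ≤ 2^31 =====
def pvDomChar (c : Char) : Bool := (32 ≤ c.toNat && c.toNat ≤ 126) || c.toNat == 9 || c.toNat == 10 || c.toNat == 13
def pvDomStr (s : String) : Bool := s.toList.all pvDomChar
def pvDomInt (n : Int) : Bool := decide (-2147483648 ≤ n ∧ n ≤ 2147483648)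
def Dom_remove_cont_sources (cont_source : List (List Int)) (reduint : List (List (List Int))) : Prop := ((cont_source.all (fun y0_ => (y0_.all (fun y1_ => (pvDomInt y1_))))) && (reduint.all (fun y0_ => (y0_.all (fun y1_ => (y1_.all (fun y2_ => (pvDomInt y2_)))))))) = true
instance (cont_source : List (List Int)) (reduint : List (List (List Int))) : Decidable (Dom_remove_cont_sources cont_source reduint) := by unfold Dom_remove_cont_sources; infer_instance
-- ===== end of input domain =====

-- B replaces A's per-candidate scan of all continuum sources by a spatial hash
-- bucketing sources into 5x5 cells, checking only the 9 neighboring cells per candidate.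


-- ===== PORT A =====
def remove_cont_sources (cont_source : List (List Int)) (reduint : List (List (List Int))) : List (List (List Int)) :=
  reduint.foldl (fun reduint_no_cont obj =>
    let cont := cont_source.foldl (fun cont co_id =>
      if (PySem.List.pyGetD (PySem.List.pyGetD obj 1 []) 0 0 - PySem.List.pyGetD co_id 0 0) ^ 2
         + (PySem.List.pyGetD (PySem.List.pyGetD obj 1 []) 1 0 - PySem.List.pyGetD co_id 1 0) ^ 2 < 25
      then true else cont) false
    if cont = false then reduint_no_cont ++ [obj] else reduint_no_cont) []

-- ===== PORT B =====
-- co[0], co[1] of a continuum source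
def pvVal (co : List Int) : Int × Int :=
  (PySem.List.pyGetD co 0 0, PySem.List.pyGetD co 1 0)
-- its grid cell (co[0] // 5, co[1] // 5)
def pvKeyOf (co : List Int) : Int × Int :=
  (PySem.Int.floordiv (PySem.List.pyGetD co 0 0) 5, PySem.Int.floordiv (PySem.List.pyGetD co 1 0) 5)
-- the grid-building loop of Source B (setdefault(key, []).append = modify with default [])
def pvGrid (cont_source : List (List Int)) : PySem.Dict (Int × Int) (List (Int × Int)) :=
  cont_source.foldl (fun d co => d.modify (pvKeyOf co) [] (· ++ [pvVal co])) PySem.Dict.empty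
-- the 'close' test of Source B: any source within distance in the 9 neighboring cells
def pvClose (grid : PySem.Dict (Int × Int) (List (Int × Int))) (x y : Int) : Bool :=
  ([-1, 0, 1] : List Int).any fun dx =>
    ([-1, 0, 1] : List Int).any fun dy =>
      (grid.getD (PySem.Int.floordiv x 5 + dx, PySem.Int.floordiv y 5 + dy) []).any fun c =>
        decide ((x - c.1) ^ 2 + (y - c.2) ^ 2 < 25)

def remove_cont_sources_alt (cont_source : List (List Int)) (reduint : List (List (List Int))) : List (List (List Int)) :=
  let grid := pvGrid cont_source
  reduint.foldl (fun out obj =>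
    if pvClose grid (PySem.List.pyGetD (PySem.List.pyGetD obj 1 []) 0 0)
                    (PySem.List.pyGetD (PySem.List.pyGetD obj 1 []) 1 0)
    then out else out ++ [obj]) []

-- ===== PRECONDITION & SPEC =====
-- Pre_ excludes inputs where some cont_source entry, some obj or some obj[1] has fewer
-- than 2 coordinates: A raises IndexError there except when the other list is empty
-- (A then never touches the short entry), a laziness B's up-front grid does not share.
def Pre_remove_cont_sources (cont_source : List (List Int)) (reduint : List (List (List Int))) : Prop :=
  (∀ co ∈ cont_source, 2 ≤ co.length) ∧
  (∀ obj ∈ reduint, 2 ≤ obj.length ∧ 2 ≤ (obj.getD 1 []).length)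
instance (cont_source : List (List Int)) (reduint : List (List (List Int))) : Decidable (Pre_remove_cont_sources cont_source reduint) := by unfold Pre_remove_cont_sources; infer_instance
def pvWitness_remove_cont_sources : List (List Int) × List (List (List Int)) :=
  ([[0, 0, 3]], [[[1, 0], [2, 3], [0]], [[2, 0], [40, 40]]])
def Spec_remove_cont_sources (cont_source : List (List Int)) (reduint : List (List (List Int))) (out : List (List (List Int))) : Prop := out = remove_cont_sources_alt cont_source reduint
instance (cont_source : List (List Int)) (reduint : List (List (List Int))) (out : List (List (List Int))) : Decidable (Spec_remove_cont_sources cont_source reduint out) := by unfold Spec_remove_cont_sources; infer_instance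

-- ===== CLAIM (what is proved, stated in full; the proofs are below) =====
def Claim_equal_remove_cont_sources : Prop := ∀ (cont_source : List (List Int)) (reduint : List (List (List Int))), Dom_remove_cont_sources cont_source reduint → Pre_remove_cont_sources cont_source reduint → Spec_remove_cont_sources cont_source reduint (remove_cont_sources cont_source reduint)

-- ===== LEMMAS AND PROOFS =====

-- A's inner flag loop is List.any
theorem pv_foldl_if_true_eq_any {α : Type} (p : α → Prop) [DecidablePred p]
    (l : List α) (b : Bool) :
    l.foldl (fun c x => if p x then true else c) b = (b || l.any fun x => decide (p x)) := by
  induction l generalizing b with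
  | nil => simp
  | cons a t ih =>
    rw [List.foldl_cons, ih]
    by_cases h : p a <;> simp [h]

-- squares below 25 mean coordinates within 4
theorem pv_dist_bound {a b : Int} (h : (a - b) ^ 2 < 25) : -4 ≤ a - b ∧ a - b ≤ 4 := by
  constructor <;> nlinarith

-- a point within 4 lies in the same or an adjacent 5-cell
theorem pv_fd_offset {a b : Int} (h : (a - b) ^ 2 < 25) :
    PySem.Int.floordiv b 5 - PySem.Int.floordiv a 5 = -1 ∨
    PySem.Int.floordiv b 5 - PySem.Int.floordiv a 5 = 0 ∨
    PySem.Int.floordiv b 5 - PySem.Int.floordiv a 5 = 1 := by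
  obtain ⟨h1, h2⟩ := pv_dist_bound h
  simp only [PySem.Int.floordiv_eq_ediv_of_pos (show (0:Int) < 5 by norm_num)]
  omega

theorem pv_grid_getD_aux (cs : List (List Int)) (d : PySem.Dict (Int × Int) (List (Int × Int)))
    (k : Int × Int) :
    (cs.foldl (fun d co => d.modify (pvKeyOf co) [] (· ++ [pvVal co])) d).getD k []
      = d.getD k [] ++ (cs.filter (fun co => pvKeyOf co == k)).map pvVal := by
  induction cs generalizing d with
  | nil => simp
  | cons a t ih =>
    rw [List.foldl_cons, ih, PySem.Dict.getD_modify]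
    by_cases h : pvKeyOf a = k
    · simp [h]
    · simp [h, Ne.symm h]

theorem pv_mem_grid (cs : List (List Int)) (k : Int × Int) (c : Int × Int) :
    c ∈ (pvGrid cs).getD k [] ↔ ∃ co ∈ cs, pvKeyOf co = k ∧ pvVal co = c := by
  unfold pvGrid
  rw [pv_grid_getD_aux]
  simp only [PySem.Dict.getD_empty, List.nil_append, List.mem_map, List.mem_filter,
    beq_iff_eq]
  tauto

theorem pv_close_eq_cont (cs : List (List Int)) (x y : Int) :
    pvClose (pvGrid cs) x y
      = cs.any (fun co =>
          decide ((x - PySem.List.pyGetD co 0 0) ^ 2 + (y - PySem.List.pyGetD co 1 0) ^ 2 < 25)) := by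
  rw [Bool.eq_iff_iff]
  simp only [pvClose, List.any_eq_true, decide_eq_true_eq, pv_mem_grid]
  constructor
  · rintro ⟨dx, _, dy, _, c, ⟨co, hco, _, hval⟩, hnear⟩
    subst hval
    simp only [pvVal] at hnear
    exact ⟨co, hco, hnear⟩
  · rintro ⟨co, hco, hnear⟩
    have hx : (x - (pvVal co).1) ^ 2 < 25 := by
      simp only [pvVal]; nlinarith [sq_nonneg (y - PySem.List.pyGetD co 1 0)]
    have hy : (y - (pvVal co).2) ^ 2 < 25 := by
      simp only [pvVal]; nlinarith [sq_nonneg (x - PySem.List.pyGetD co 0 0)]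
    have hdx := pv_fd_offset hx
    have hdy := pv_fd_offset hy
    refine ⟨PySem.Int.floordiv (pvVal co).1 5 - PySem.Int.floordiv x 5, ?_,
            PySem.Int.floordiv (pvVal co).2 5 - PySem.Int.floordiv y 5, ?_,
            pvVal co, ⟨co, hco, ?_, rfl⟩, ?_⟩
    · rcases hdx with h | h | h <;> rw [h] <;> simp
    · rcases hdy with h | h | h <;> rw [h] <;> simp
    · simp only [pvKeyOf, pvVal, Prod.mk.injEq]
      constructor <;> ring
    · simp only [pvVal]
      exact hnear

theorem pv_ports_agree (cs : List (List Int)) (reduint : List (List (List Int))) :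
    remove_cont_sources cs reduint = remove_cont_sources_alt cs reduint := by
  simp only [remove_cont_sources, remove_cont_sources_alt]
  apply List.foldl_ext
  intro acc obj _
  rw [pv_foldl_if_true_eq_any, Bool.false_or, pv_close_eq_cont]
  cases h : cs.any (fun co =>
      decide ((PySem.List.pyGetD (PySem.List.pyGetD obj 1 []) 0 0 - PySem.List.pyGetD co 0 0) ^ 2
        + (PySem.List.pyGetD (PySem.List.pyGetD obj 1 []) 1 0 - PySem.List.pyGetD co 1 0) ^ 2 < 25)) <;>
    simp

-- ===== VERDICT (by name: the statement is the Claim_ definition above) =====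
theorem remove_cont_sources_spec : Claim_equal_remove_cont_sources := by
  intro cs reduint _ _
  unfold Spec_remove_cont_sources
  exact pv_ports_agree cs reduint
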